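-- pv_equiv track=rewrite | github.com/intel/intel-xai-tools | model_card_gen/intel_ai_safety/model_card_gen/graphics/plotly_utils.py | show_nth_trace
-- ===== SOURCE A (Python) =====
-- def show_nth_trace(n, trace_per_graph, graph_count):
--     """Return a generator of bools such that the nth (count stating at 1)
--     of a group of size `trace_per_graph` of a collection of `graph_count`
--     groups.
--
--     Example:
--         _show_nth_trace(2, 3, 2) returns iter([False, True, False, True])
--     """
--     if n > trace_per_graph:
--         raise ValueError(f"Cannot show {n}th item of a group of size {trace_per_graph}")
--     for i in range(trace_per_graph * graph_count):
--         if i % trace_per_graph == (n - 1) and (n == 1 or i != 0):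
--             yield True
--         else:
--             yield False
-- ===== SOURCE B (Python) =====
-- def show_nth_trace(n, trace_per_graph, graph_count):
--     """Return a generator of bools marking the nth position (1-based) in each
--     of `graph_count` groups of size `trace_per_graph`."""
--     if n > trace_per_graph:
--         raise ValueError(f"Cannot show {n}th item of a group of size {trace_per_graph}")
--     if trace_per_graph <= 0 or graph_count <= 0:
--         return
--     pattern = [j == n - 1 for j in range(trace_per_graph)]
--     for _ in range(graph_count):
--         yield from pattern
-- ===== Notes on version B (the rewrite author's own statement) =====
-- stated objective: simpler
-- what changed: Instead of one flat loop over range(trace_per_graph*graph_count) testing i % trace_per_graph == n-1 plus the redundant (n == 1 or i != 0) clause, B returns early for non-positive sizes, builds the per-group boolean pattern [j == n-1 ...] once and yields it graph_count times.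
-- intended difference: When trace_per_graph and graph_count are both negative, A yields trace_per_graph*graph_count (a positive count of) False values because range() sees the positive product, while B yields the empty sequence, which is the intended result for non-positive group sizes/counts. — e.g. on show_nth_trace(-2, -1, -1): A returns [false], B returns []
import Mathlib
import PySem

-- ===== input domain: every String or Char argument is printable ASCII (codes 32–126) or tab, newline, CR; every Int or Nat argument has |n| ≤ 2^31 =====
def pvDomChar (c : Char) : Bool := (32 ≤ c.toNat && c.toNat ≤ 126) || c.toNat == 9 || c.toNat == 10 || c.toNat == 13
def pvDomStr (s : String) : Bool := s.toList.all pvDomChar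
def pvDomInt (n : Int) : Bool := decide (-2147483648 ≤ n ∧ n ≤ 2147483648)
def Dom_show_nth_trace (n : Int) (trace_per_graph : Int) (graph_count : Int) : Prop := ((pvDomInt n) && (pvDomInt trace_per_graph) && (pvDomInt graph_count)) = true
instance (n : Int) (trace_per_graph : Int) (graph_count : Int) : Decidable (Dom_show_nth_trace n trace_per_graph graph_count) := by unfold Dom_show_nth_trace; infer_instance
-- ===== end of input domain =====

-- B replaces the flat modulo-indexed loop by nested group/position loops yielding j == n-1 (simpler; same cost).


-- ===== PORT A =====
-- if n > trace_per_graph, A raises ValueError: excluded by Pre_show_nth_trace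
def show_nth_trace (n : Int) (trace_per_graph : Int) (graph_count : Int) : List Bool :=
  (PySem.List.pyRange 0 (trace_per_graph * graph_count) 1).foldl
    (fun acc i =>
      acc ++ [if PySem.Int.mod i trace_per_graph = n - 1 ∧ (n = 1 ∨ i ≠ 0) then true else false])
    []

-- ===== PORT B =====
def show_nth_trace_alt (n : Int) (trace_per_graph : Int) (graph_count : Int) : List Bool :=
  if trace_per_graph ≤ 0 ∨ graph_count ≤ 0 then []
  else
    let pattern := (PySem.List.pyRange 0 trace_per_graph 1).map (fun j => decide (j = n - 1))
    (PySem.List.pyRange 0 graph_count 1).foldl (fun acc _ => acc ++ pattern) []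

-- ===== PRECONDITION & SPEC =====
-- A raises ValueError exactly when n > trace_per_graph
def Pre_show_nth_trace (n : Int) (trace_per_graph : Int) (graph_count : Int) : Prop :=
  n ≤ trace_per_graph
instance (n : Int) (trace_per_graph : Int) (graph_count : Int) : Decidable (Pre_show_nth_trace n trace_per_graph graph_count) := by unfold Pre_show_nth_trace; infer_instance

def pvWitness_show_nth_trace : Int × Int × Int := (2, 3, 2)

-- When trace_per_graph and graph_count are both negative, A returns trace_per_graph*graph_count (a positive count of) False values because range() sees the positive product; B returns the empty list, the intended result for non-positive group sizes/counts.
def D_show_nth_trace (n : Int) (trace_per_graph : Int) (graph_count : Int) : Prop :=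
  trace_per_graph < 0 ∧ graph_count < 0
instance (n : Int) (trace_per_graph : Int) (graph_count : Int) : Decidable (D_show_nth_trace n trace_per_graph graph_count) := by unfold D_show_nth_trace; infer_instance

def Spec_show_nth_trace (n : Int) (trace_per_graph : Int) (graph_count : Int) (out : List Bool) : Prop := ¬ D_show_nth_trace n trace_per_graph graph_count → out = show_nth_trace_alt n trace_per_graph graph_count
instance (n : Int) (trace_per_graph : Int) (graph_count : Int) (out : List Bool) : Decidable (Spec_show_nth_trace n trace_per_graph graph_count out) := by unfold Spec_show_nth_trace; infer_instance

def pvDiffWitness_show_nth_trace : Int × Int × Int := (-2, -1, -1)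
def pvDiffWitnessOut_show_nth_trace : (List Bool) × (List Bool) := ([false], [])

-- ===== CLAIM (what is proved, stated in full; the proofs are below) =====
def Claim_unchanged_show_nth_trace : Prop := ∀ (n : Int) (trace_per_graph : Int) (graph_count : Int), Dom_show_nth_trace n trace_per_graph graph_count → Pre_show_nth_trace n trace_per_graph graph_count → Spec_show_nth_trace n trace_per_graph graph_count (show_nth_trace n trace_per_graph graph_count)
def Claim_changed_show_nth_trace : Prop := Dom_show_nth_trace (pvDiffWitness_show_nth_trace.1) (pvDiffWitness_show_nth_trace.2.1) (pvDiffWitness_show_nth_trace.2.2) ∧ Pre_show_nth_trace (pvDiffWitness_show_nth_trace.1) (pvDiffWitness_show_nth_trace.2.1) (pvDiffWitness_show_nth_trace.2.2) ∧ D_show_nth_trace (pvDiffWitness_show_nth_trace.1) (pvDiffWitness_show_nth_trace.2.1) (pvDiffWitness_show_nth_trace.2.2) ∧ show_nth_trace (pvDiffWitness_show_nth_trace.1) (pvDiffWitness_show_nth_trace.2.1) (pvDiffWitness_show_nth_trace.2.2) = pvDiffWitnessOut_show_nth_trace.1 ∧ show_nth_trace_alt (pvDiffWitness_show_nth_trace.1)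 (pvDiffWitness_show_nth_trace.2.1) (pvDiffWitness_show_nth_trace.2.2) = pvDiffWitnessOut_show_nth_trace.2 ∧ pvDiffWitnessOut_show_nth_trace.1 ≠ pvDiffWitnessOut_show_nth_trace.2
def Claim_exact_show_nth_trace : Prop := ∀ (n : Int) (trace_per_graph : Int) (graph_count : Int), Dom_show_nth_trace n trace_per_graph graph_count → Pre_show_nth_trace n trace_per_graph graph_count → D_show_nth_trace n trace_per_graph graph_count → show_nth_trace n trace_per_graph graph_count ≠ show_nth_trace_alt n trace_per_graph graph_count

-- ===== LEMMAS AND PROOFS =====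

-- fold that appends one element per item is init ++ map
theorem pv_foldl_append_map {α : Type} (g : α → Bool) :
    ∀ (l : List α) (init : List Bool),
      l.foldl (fun acc j => acc ++ [g j]) init = init ++ l.map g := by
  intro l
  induction l with
  | nil => intro init; simp
  | cons x xs ih => intro init; simp [List.foldl, ih]

-- fold that appends a fixed block per item is init ++ (length copies of the block) flattened
theorem pv_foldl_append_const {α : Type} (pat : List Bool) :
    ∀ (l : List α) (init : List Bool),
      l.foldl (fun acc _ => acc ++ pat) init = init ++ (List.replicate l.length pat).flatten := by
  intro l
  induction l with
  | nil => intro init; simp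
  | cons x xs ih => intro init; simp [List.foldl, ih, List.replicate_succ]

-- the element produced by A at offset k of the group starting at a (a ≥ 0 a multiple-free bound suffices)
theorem pv_cell (n t a k : Int) (ht : 0 < t) (ha : 0 ≤ a) (hta : t ∣ a)
    (hk0 : 0 ≤ k) (hkt : k < t) :
    (if PySem.Int.mod (a + k) t = n - 1 ∧ (n = 1 ∨ a + k ≠ 0) then true else false)
      = decide (k = n - 1) := by
  have hmod : PySem.Int.mod (a + k) t = k := by
    rw [PySem.Int.mod_eq_emod_of_pos ht]
    obtain ⟨c, rfl⟩ := hta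
    have hc : t * c + k = k + t * c := by ring
    rw [hc, Int.add_mul_emod_self_left]
    exact Int.emod_eq_of_lt hk0 hkt
  rw [hmod]
  by_cases hk : k = n - 1
  · subst hk
    by_cases hn : n = 1
    · simp [hn]
    · have : a + (n - 1) ≠ 0 := by omega
      simp [this, hn]
  · simp [hk]

-- A's body over one group equals B's pattern
theorem pv_group (n t a : Int) (ht : 0 < t) (ha : 0 ≤ a) (hta : t ∣ a) :
    (PySem.List.pyRange a (a + t) 1).map
        (fun i => if PySem.Int.mod i t = n - 1 ∧ (n = 1 ∨ i ≠ 0) then true else false)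
      = (PySem.List.pyRange 0 t 1).map (fun j => decide (j = n - 1)) := by
  rw [PySem.List.pyRange_one a (a + t), PySem.List.pyRange_one 0 t]
  simp only [add_sub_cancel_left, sub_zero, List.map_map]
  apply List.map_congr_left
  intro k hk
  have hkt : (k : Int) < t := by
    have := List.mem_range.mp hk
    omega
  simp only [Function.comp_apply, zero_add]
  exact pv_cell n t a k ht ha hta (by positivity) hkt

-- main positive case, by induction on the number of groups
theorem pv_main (n t : Int) (ht : 0 < t) :
    ∀ (g : Nat),
      (PySem.List.pyRange 0 (t * (g : Int)) 1).map
          (fun i => if PySem.Int.mod i t = n - 1 ∧ (n = 1 ∨ i ≠ 0) then true else false)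
        = (List.replicate g ((PySem.List.pyRange 0 t 1).map (fun j => decide (j = n - 1)))).flatten := by
  intro g
  induction g with
  | zero => simp [PySem.List.pyRange_one_eq_nil]
  | succ m ih =>
    have h1 : (0:Int) ≤ t * (m : Int) := by positivity
    have h2 : t * (m : Int) ≤ t * ((m + 1 : Nat) : Int) := by push_cast; nlinarith
    rw [PySem.List.pyRange_one_append 0 (t * (m : Int)) (t * ((m + 1 : Nat) : Int)) h1 h2,
        List.map_append, ih]
    have hsplit : t * ((m + 1 : Nat) : Int) = t * (m : Int) + t := by push_cast; ring
    rw [hsplit, pv_group n t (t * (m : Int)) ht h1 ⟨m, rfl⟩]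
    rw [List.replicate_succ' ]
    simp

-- ===== VERDICT (by name: the statement is the Claim_ definition above) =====
theorem show_nth_trace_spec : Claim_unchanged_show_nth_trace := by
  intro n t g _ hpre hnd
  unfold show_nth_trace show_nth_trace_alt
  rw [pv_foldl_append_map]
  simp only [List.nil_append]
  by_cases hguard : t ≤ 0 ∨ g ≤ 0
  · -- B returns [] at its guard; A's range is empty too (¬D_ rules out a positive product)
    rw [if_pos hguard]
    have h1 : t * g ≤ 0 := by
      rcases hguard with htle | hgle
      · rcases lt_or_eq_of_le htle with htneg | hteq
        · have hgd : 0 ≤ g := by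
            unfold D_show_nth_trace at hnd
            by_contra h
            exact hnd ⟨htneg, by omega⟩
          nlinarith
        · simp [hteq]
      · rcases lt_or_eq_of_le hgle with hgneg | hgeq
        · by_cases htpos : 0 < t
          · nlinarith
          · have : t = 0 := by
              unfold D_show_nth_trace at hnd
              by_contra h
              exact hnd ⟨by omega, hgneg⟩
            simp [this]
        · simp [hgeq]
    have h2 : PySem.List.pyRange 0 (t * g) 1 = [] :=
      PySem.List.pyRange_one_eq_nil (by omega)
    simp [h2]
  · -- 0 < t and 0 < g: the main case
    push_neg at hguard
    obtain ⟨ht, hg⟩ := hguard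
    rw [if_neg (by omega), pv_foldl_append_const]
    simp only [List.nil_append]
    have hg' : g = ((g.toNat : Nat) : Int) := by omega
    rw [hg', pv_main n t ht g.toNat]
    simp [PySem.List.length_pyRange_one]
    have hmax : (max g 0).toNat = g.toNat := by omega
    rw [hmax]

theorem show_nth_trace_tight : Claim_exact_show_nth_trace := by
  intro n t g _ _ hd
  obtain ⟨ht, hg⟩ := hd
  intro heq
  -- B is empty (its guard fires), A is nonempty (positive product)
  have hB : show_nth_trace_alt n t g = [] := by
    unfold show_nth_trace_alt
    rw [if_pos (Or.inl (le_of_lt ht))]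
  have hpos : 0 < t * g := mul_pos_of_neg_of_neg ht hg
  have hA : show_nth_trace n t g ≠ [] := by
    unfold show_nth_trace
    rw [pv_foldl_append_map]
    simp only [List.nil_append, ne_eq, List.map_eq_nil_iff]
    intro hnil
    have := congrArg List.length hnil
    rw [PySem.List.length_pyRange_one] at this
    simp at this
    omega
  exact hA (heq.trans hB)

theorem show_nth_trace_changed : Claim_changed_show_nth_trace := by
  unfold Claim_changed_show_nth_trace; decide
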